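-- pv_equiv track=rewrite | github.com/saranshbhardwaj/doc-intelligence | backend/app/verticals/real_estate/template_filling/excel/table_detector.py | _split_row_cells_by_gaps
-- ===== SOURCE A (Python) =====
-- from typing import Any, Dict, List, Optional, Tuple
--
-- def _split_row_cells_by_gaps(row_cells: List[tuple], gap_threshold: int = 1) -> List[List[tuple]]:
--     """
--     Split row cells into separate groups when there are gaps (empty columns).
--
--     This prevents combining separate sections (e.g., key-value section + table)
--     into a single table, enabling proper hierarchical header detection.
--
--     Args:
--         row_cells: List of (col_idx, value) tuples
--         gap_threshold: Minimum gap size to split (default 1 empty column)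
--
--     Returns:
--         List of row cell groups (each group is a list of (col_idx, value) tuples)
--     """
--     if not row_cells:
--         return []
--
--     # Sort by column index
--     sorted_cells = sorted(row_cells, key=lambda x: x[0])
--
--     groups = []
--     current_group = [sorted_cells[0]]
--
--     for i in range(1, len(sorted_cells)):
--         prev_col = sorted_cells[i - 1][0]
--         curr_col = sorted_cells[i][0]
--         gap = curr_col - prev_col - 1  # Number of empty columns between
--
--         if gap >= gap_threshold:
--             # Gap detected - save current group and start new one
--             groups.append(current_group)
--             current_group = [sorted_cells[i]]
--         else:
--             # No significant gap - add to current group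
--             current_group.append(sorted_cells[i])
--
--     # Add the last group
--     if current_group:
--         groups.append(current_group)
--
--     return groups
-- ===== SOURCE B (Python) =====
-- def _split_row_cells_by_gaps(row_cells, gap_threshold=1):
--     if not row_cells:
--         return []
--     s = sorted(row_cells, key=lambda x: x[0])
--     cuts = [i for i, (a, b) in enumerate(zip(s, s[1:]), 1)
--             if b[0] - a[0] - 1 >= gap_threshold]
--     bounds = [0] + cuts + [len(s)]
--     return [s[b:c] for b, c in zip(bounds, bounds[1:])]
-- ===== Notes on version B (the rewrite author's own statement) =====
-- stated objective: alternative
-- what changed: Instead of A's running (groups, current_group) accumulator loop, B computes the list of cut indices from adjacent sorted pairs and then materialises each group as a slice between consecutive boundaries.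
import Mathlib
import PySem

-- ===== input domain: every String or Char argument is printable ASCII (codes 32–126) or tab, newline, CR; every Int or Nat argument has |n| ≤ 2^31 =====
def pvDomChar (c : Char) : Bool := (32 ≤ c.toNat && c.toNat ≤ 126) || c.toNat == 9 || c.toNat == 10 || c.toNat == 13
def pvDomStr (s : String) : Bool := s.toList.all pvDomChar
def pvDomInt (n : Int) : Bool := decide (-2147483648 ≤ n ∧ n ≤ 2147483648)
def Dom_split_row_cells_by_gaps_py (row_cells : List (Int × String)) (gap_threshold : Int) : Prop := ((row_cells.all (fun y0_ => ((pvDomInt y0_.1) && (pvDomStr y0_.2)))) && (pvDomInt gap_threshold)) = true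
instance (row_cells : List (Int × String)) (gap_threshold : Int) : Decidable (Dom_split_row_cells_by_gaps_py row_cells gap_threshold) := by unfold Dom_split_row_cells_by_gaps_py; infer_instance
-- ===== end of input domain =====

-- B replaces A's running (groups, current_group) accumulator loop by computing the cut
-- indices from adjacent sorted pairs and slicing the sorted list between consecutive
-- boundaries (alternative decomposition, same cost).


-- ===== PORT A =====
-- the for-loop of A: state (groups, current_group), prev carried as sorted_cells[i-1]
def loopA (g : Int) (prev : Int × String) (rest : List (Int × String))
    (groups : List (List (Int × String))) (cur : List (Int × String)) :
    List (List (Int × String)) × List (Int × String) :=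
  match rest with
  | [] => (groups, cur)
  | c :: rs =>
    if c.1 - prev.1 - 1 ≥ g then loopA g c rs (groups ++ [cur]) [c]
    else loopA g c rs groups (cur ++ [c])

-- current_group = [sorted_cells[0]], then the loop from i = 1, then the final append
def groupsA (g : Int) : List (Int × String) → List (List (Int × String))
  | [] => []
  | x :: rest =>
    let r := loopA g x rest [] [x]
    if r.2 ≠ [] then r.1 ++ [r.2] else r.1

def split_row_cells_by_gaps_py (row_cells : List (Int × String)) (gap_threshold : Int) : List (List (Int × String)) :=
  if row_cells = [] then []
  else groupsA gap_threshold (PySem.List.sorted row_cells (fun x => x.1) false)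

-- ===== PORT B =====
def split_row_cells_by_gaps_py_alt (row_cells : List (Int × String)) (gap_threshold : Int) : List (List (Int × String)) :=
  if row_cells = [] then []
  else
    let s := PySem.List.sorted row_cells (fun x => x.1) false
    let cuts := ((PySem.List.enumerate (s.zip (PySem.List.slice s (some 1) none)) 1).filter
        (fun p => decide (p.2.2.1 - p.2.1.1 - 1 ≥ gap_threshold))).map (fun p => p.1)
    let bounds := 0 :: (cuts ++ [(s.length : Int)])
    (bounds.zip bounds.tail).map (fun bc => PySem.List.slice s (some bc.1) (some bc.2))

-- ===== PRECONDITION & SPEC =====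
def Spec_split_row_cells_by_gaps_py (row_cells : List (Int × String)) (gap_threshold : Int) (out : List (List (Int × String))) : Prop := out = split_row_cells_by_gaps_py_alt row_cells gap_threshold
instance (row_cells : List (Int × String)) (gap_threshold : Int) (out : List (List (Int × String))) : Decidable (Spec_split_row_cells_by_gaps_py row_cells gap_threshold out) := by unfold Spec_split_row_cells_by_gaps_py; infer_instance

-- ===== CLAIM (what is proved, stated in full; the proofs are below) =====
def Claim_equal_split_row_cells_by_gaps_py : Prop := ∀ (row_cells : List (Int × String)) (gap_threshold : Int), Dom_split_row_cells_by_gaps_py row_cells gap_threshold → Spec_split_row_cells_by_gaps_py row_cells gap_threshold (split_row_cells_by_gaps_py row_cells gap_threshold)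

-- ===== LEMMAS AND PROOFS =====

-- reference grouping recursion both sides are reduced to
def specRec (g : Int) (cur : List (Int × String)) (prev : Int × String) :
    List (Int × String) → List (List (Int × String))
  | [] => [cur]
  | c :: rest =>
    if c.1 - prev.1 - 1 ≥ g then cur :: specRec g [c] c rest
    else specRec g (cur ++ [c]) c rest

-- recursive form of B's cut-index list (index of the right cell of each gapped pair)
def cutsFrom (g : Int) (prev : Int × String) : List (Int × String) → Int → List Int
  | [], _ => []
  | c :: rest, k =>
    if c.1 - prev.1 - 1 ≥ g then k :: cutsFrom g c rest (k + 1)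
    else cutsFrom g c rest (k + 1)

-- recursive form of B's consecutive-boundary slicing
def slicesOf (s : List (Int × String)) : List Int → List (List (Int × String))
  | b :: c :: rest => PySem.List.slice s (some b) (some c) :: slicesOf s (c :: rest)
  | _ => []

theorem loopA_snd_ne (g : Int) (rest : List (Int × String)) :
    ∀ prev groups cur, cur ≠ [] → (loopA g prev rest groups cur).2 ≠ [] := by
  induction rest with
  | nil => intro prev groups cur h; simpa [loopA] using h
  | cons c rs ih =>
    intro prev groups cur h
    simp only [loopA]
    split <;> [exact ih c (groups ++ [cur]) [c] (by simp); exact ih c groups (cur ++ [c]) (by simp)]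

theorem loopA_eq_specRec (g : Int) (rest : List (Int × String)) :
    ∀ prev groups cur, (loopA g prev rest groups cur).1 ++ [(loopA g prev rest groups cur).2]
      = groups ++ specRec g cur prev rest := by
  induction rest with
  | nil => intro prev groups cur; simp [loopA, specRec]
  | cons c rs ih =>
    intro prev groups cur
    simp only [loopA, specRec]
    split
    · rw [ih c (groups ++ [cur]) [c]]; simp
    · rw [ih c groups (cur ++ [c])]

theorem cuts_eq_cutsFrom (g : Int) (l : List (Int × String)) :
    ∀ (prev : Int × String) (k : Int),
      ((PySem.List.enumerate ((prev :: l).zip l) k).filter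
          (fun p => decide (p.2.2.1 - p.2.1.1 - 1 ≥ g))).map (fun p => p.1)
        = cutsFrom g prev l k := by
  induction l with
  | nil => intro prev k; simp [cutsFrom]
  | cons c rs ih =>
    intro prev k
    rw [show (prev :: c :: rs).zip (c :: rs) = (prev, c) :: (c :: rs).zip rs from rfl,
        PySem.List.enumerate_cons, List.filter_cons]
    by_cases h : c.1 - prev.1 - 1 ≥ g
    · rw [if_pos (by simp [h]), List.map_cons, ih c (k + 1)]
      simp only [cutsFrom, if_pos h]
    · rw [if_neg (by simp [h]), ih c (k + 1)]
      simp only [cutsFrom, if_neg h]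

theorem zip_map_eq_slicesOf (s : List (Int × String)) (L : List Int) :
    ∀ b : Int, (((b :: L).zip L).map (fun bc => PySem.List.slice s (some bc.1) (some bc.2)))
      = slicesOf s (b :: L) := by
  induction L with
  | nil => intro b; simp [slicesOf]
  | cons c rs ih =>
    intro b
    simp only [List.zip_cons_cons, List.map_cons, slicesOf]
    rw [ih c]

theorem slicesOf_cutsFrom (g : Int) (s : List (Int × String)) (l : List (Int × String)) :
    ∀ (prev : Int × String) (b k : ℕ), b ≤ k → l = s.drop k →
      slicesOf s ((b : Int) :: (cutsFrom g prev l (k : Int) ++ [(s.length : Int)]))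
        = specRec g ((s.take k).drop b) prev l := by
  induction l with
  | nil =>
    intro prev b k hbk hl
    have hk : s.length ≤ k := by
      by_contra h
      have := List.drop_eq_nil_iff.mp hl.symm
      omega
    simp only [cutsFrom, List.nil_append, slicesOf, specRec]
    rw [PySem.List.slice_natCast, List.take_of_length_le hk,
        List.take_of_length_le (by simp)]
  | cons c rest ih =>
    intro prev b k hbk hl
    have hk : k < s.length := by
      by_contra h
      rw [List.drop_eq_nil_iff.mpr (by omega)] at hl
      exact List.cons_ne_nil _ _ hl
    have hcd := List.getElem_cons_drop hk
    rw [← hl] at hcd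
    injection hcd with hc hrest'
    have hrest : rest = s.drop (k + 1) := hrest'.symm
    have hlen : (s.take k).length = k := by rw [List.length_take]; omega
    have htk : s.take (k + 1) = s.take k ++ [c] := by
      simp [List.take_add_one, List.getElem?_eq_getElem hk, hc]
    simp only [cutsFrom, specRec]
    by_cases h : c.1 - prev.1 - 1 ≥ g
    · simp only [h, if_pos, List.cons_append, slicesOf]
      have ihx := ih c k (k + 1) (by omega) hrest
      push_cast at ihx ⊢
      rw [ihx]
      congr 1
      · rw [PySem.List.slice_natCast, List.drop_take]
      · congr 1
        rw [htk, List.drop_append_of_le_length (by omega),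
            List.drop_eq_nil_iff.mpr (by omega), List.nil_append]
    · simp only [h, if_neg, not_false_iff]
      have ihx := ih c b (k + 1) (by omega) hrest
      push_cast at ihx ⊢
      rw [ihx, htk, List.drop_append_of_le_length (by omega)]
-- ===== VERDICT (by name: the statement is the Claim_ definition above) =====
theorem split_row_cells_by_gaps_py_spec : Claim_equal_split_row_cells_by_gaps_py := by
  intro rc g _
  unfold Spec_split_row_cells_by_gaps_py split_row_cells_by_gaps_py split_row_cells_by_gaps_py_alt
  by_cases hrc : rc = []
  · simp [hrc]
  · simp only [hrc, if_neg, not_false_iff]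
    obtain ⟨x, rest, hx⟩ := List.exists_cons_of_ne_nil
      (show PySem.List.sorted rc (fun x => x.1) false ≠ [] by
        rw [Ne, PySem.List.sorted_eq_nil_iff]; exact hrc)
    rw [hx, PySem.List.slice_from_one]
    simp only [groupsA, List.tail_cons]
    rw [if_pos (loopA_snd_ne g rest x [] [x] (by simp)), loopA_eq_specRec,
        cuts_eq_cutsFrom, zip_map_eq_slicesOf]
    have h1 := slicesOf_cutsFrom g (x :: rest) rest x 0 1 (by omega) (by simp)
    simp only [Nat.cast_zero, Nat.cast_one] at h1
    rw [h1]
    simp
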